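-- pv_equiv track=rewrite | github.com/haribhaski/DDMM_project | new.py | filter_relevant_sentences
-- ===== SOURCE A (Python) =====
-- from typing import List, Dict, Tuple, Optional
--
-- def filter_relevant_sentences(sentences: List[str]) -> List[str]:
--     """Filter sentences relevant to HEAs and hydrogen storage"""
--     keywords = [
--         'high entropy', 'hea', 'hydrogen storage', 'hydride',
--         'absorption', 'desorption', 'capacity', 'alloy',
--         'materials', 'synthesis', 'microstructure', 'phase',
--         'mechanical properties', 'characterization', 'defect',
--         'crack', 'void', 'dislocation'
--     ]
--
--     relevant_sentences = []
--     for sentence in sentences: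
--         if any(keyword in sentence.lower() for keyword in keywords):
--             relevant_sentences.append(sentence)
--
--     return relevant_sentences
-- ===== SOURCE B (Python) =====
-- def filter_relevant_sentences(sentences):
--     """Filter sentences relevant to HEAs and hydrogen storage.
--
--     Position-major multi-pattern scan: walk each lowered sentence once and, at
--     every position, use a first-character dispatch table to test only the
--     keywords that could start there, instead of a separate substring search
--     per keyword."""
--     keywords = [
--         'high entropy', 'hea', 'hydrogen storage', 'hydride',
--         'absorption', 'desorption', 'capacity', 'alloy',
--         'materials', 'synthesis', 'microstructure', 'phase',
--         'mechanical properties', 'characterization', 'defect',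
--         'crack', 'void', 'dislocation'
--     ]
--     by_first = {}
--     for k in keywords:
--         by_first.setdefault(k[0], []).append(k)
--
--     relevant_sentences = []
--     for sentence in sentences:
--         low = sentence.lower()
--         for i, c in enumerate(low):
--             ks = by_first.get(c)
--             if ks is not None and any(low.startswith(k, i) for k in ks):
--                 relevant_sentences.append(sentence)
--                 break
--     return relevant_sentences
-- ===== Notes on version B (the rewrite author's own statement) =====
-- stated objective: alternative
-- what changed: B replaces A's per-keyword substring searches with a position-major scan: a first-character dispatch dict is built once, each lowered sentence is walked once, and at each position only the keywords indexed under that character are tested with startswith.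
import Mathlib
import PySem

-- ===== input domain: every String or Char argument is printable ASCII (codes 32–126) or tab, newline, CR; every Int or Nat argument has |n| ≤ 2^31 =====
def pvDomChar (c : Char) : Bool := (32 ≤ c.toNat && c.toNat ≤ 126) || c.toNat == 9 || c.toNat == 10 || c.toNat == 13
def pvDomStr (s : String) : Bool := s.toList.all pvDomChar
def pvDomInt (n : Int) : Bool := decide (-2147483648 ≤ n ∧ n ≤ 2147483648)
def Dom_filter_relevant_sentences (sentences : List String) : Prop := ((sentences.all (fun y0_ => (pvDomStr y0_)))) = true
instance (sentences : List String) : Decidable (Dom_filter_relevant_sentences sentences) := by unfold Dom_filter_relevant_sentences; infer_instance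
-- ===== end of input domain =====

-- B replaces A's per-keyword substring searches with a position-major scan: a
-- first-character dispatch dict built once, then one walk over each lowered sentence
-- testing only the keywords indexed under that character; alternative structure, same cost.


-- ===== PORT A =====
def pvKeywordsA : List String :=
  ["high entropy", "hea", "hydrogen storage", "hydride",
   "absorption", "desorption", "capacity", "alloy",
   "materials", "synthesis", "microstructure", "phase",
   "mechanical properties", "characterization", "defect",
   "crack", "void", "dislocation"]

def filter_relevant_sentences (sentences : List String) : List String :=
  sentences.foldl
    (fun relevant_sentences sentence =>
      if pvKeywordsA.any (fun keyword => PySem.Str.isIn keyword (PySem.Str.lower sentence)) then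
        relevant_sentences ++ [sentence]
      else relevant_sentences)
    []

-- ===== PORT B =====
def pvKeywordsB : List String :=
  ["high entropy", "hea", "hydrogen storage", "hydride",
   "absorption", "desorption", "capacity", "alloy",
   "materials", "synthesis", "microstructure", "phase",
   "mechanical properties", "characterization", "defect",
   "crack", "void", "dislocation"]

-- by_first: for k in keywords: by_first.setdefault(k[0], []).append(k)
def pvByFirst : PySem.Dict (Option Char) (List String) :=
  pvKeywordsB.foldl
    (fun d k => d.insert (PySem.Str.pyGet? k 0) (d.getD (PySem.Str.pyGet? k 0) [] ++ [k]))
    PySem.Dict.empty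

-- inner loop of B: for i, c in enumerate(low): ks = by_first.get(c); if ks is not None and any(...): keep, break
def pvRelevantB (sentence : String) : Bool :=
  let low := (PySem.Str.lower sentence).toList
  (PySem.List.enumerate low).any (fun ic =>
    match pvByFirst.get? (some ic.2) with
    | none => false
    | some ks => ks.any (fun k => PySem.Chars.startswith (low.drop ic.1.toNat) k.toList))

def filter_relevant_sentences_alt (sentences : List String) : List String :=
  sentences.filter pvRelevantB

-- ===== PRECONDITION & SPEC =====
def Spec_filter_relevant_sentences (sentences : List String) (out : List String) : Prop := out = filter_relevant_sentences_alt sentences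
instance (sentences : List String) (out : List String) : Decidable (Spec_filter_relevant_sentences sentences out) := by unfold Spec_filter_relevant_sentences; infer_instance

-- ===== CLAIM (what is proved, stated in full; the proofs are below) =====
def Claim_equal_filter_relevant_sentences : Prop := ∀ (sentences : List String), Dom_filter_relevant_sentences sentences → Spec_filter_relevant_sentences sentences (filter_relevant_sentences sentences)

-- ===== LEMMAS AND PROOFS =====

-- Python's 'ks = d.get(c); ks is not None and any(p, ks)' as an any over getD with default []
theorem pv_match_get?_eq_any_getD {κ : Type} [BEq κ] (d : PySem.Dict κ (List String)) (key : κ)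
    (p : String → Bool) :
    (match d.get? key with
     | none => false
     | some ks => ks.any p) = (d.getD key []).any p := by
  rw [PySem.Dict.getD_eq_get?_getD]
  cases d.get? key <;> rfl

-- the setdefault/append grouping fold, characterised: lookup = the keywords whose key matches, in order
theorem pv_groupfold_getD (ks : List String) (d : PySem.Dict (Option Char) (List String))
    (c : Option Char) :
    ((ks.foldl
        (fun d k => d.insert (PySem.Str.pyGet? k 0) (d.getD (PySem.Str.pyGet? k 0) [] ++ [k]))
        d).getD c [])
      = d.getD c [] ++ ks.filter (fun k => PySem.Str.pyGet? k 0 == c) := by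
  induction ks generalizing d with
  | nil => simp
  | cons k t ih =>
    simp only [List.foldl_cons, List.filter_cons, ih, PySem.Dict.getD_insert]
    by_cases h : c = PySem.Str.pyGet? k 0
    · simp [h, List.append_assoc]
    · rw [if_neg h, if_neg (fun he => h (beq_iff_eq.mp he).symm)]

-- keyword-major substring search = position-major first-char-dispatched startswith scan
theorem pv_per_sentence (s : String) :
    pvKeywordsA.any (fun keyword => PySem.Str.isIn keyword (PySem.Str.lower s)) =
    pvRelevantB s := by
  unfold pvRelevantB pvByFirst
  have hne : ∀ k ∈ pvKeywordsB, k.toList ≠ [] := by decide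
  have hAB : pvKeywordsA = pvKeywordsB := rfl
  rw [hAB]
  set low := (PySem.Str.lower s).toList with hlow
  apply Bool.eq_iff_iff.mpr
  simp only [List.any_eq_true, pv_match_get?_eq_any_getD, pv_groupfold_getD,
    PySem.Dict.getD_empty, List.nil_append, List.mem_filter,
    PySem.Str.isIn, PySem.Chars.startswith_iff, ← hlow]
  constructor
  · rintro ⟨k, hkmem, hin⟩
    obtain ⟨j, hj⟩ := (PySem.Chars.exists_prefix_drop_iff_isIn k.toList low).2 hin
    have hjlt : j < low.length := by
      by_contra hge
      rw [List.drop_eq_nil_of_le (by omega)] at hj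
      exact hne k hkmem (List.prefix_nil.mp hj)
    refine ⟨((j : Int), low[j]), ?_, k, ⟨hkmem, ?_⟩, ?_⟩
    · refine List.mem_iff_getElem.mpr ⟨j, by simpa [PySem.List.length_enumerate], ?_⟩
      rw [PySem.List.getElem_enumerate]; simp
    · obtain ⟨a, rest, hk⟩ : ∃ a rest, k.toList = a :: rest := by
        cases hkt : k.toList with
        | nil => exact absurd hkt (hne k hkmem)
        | cons a rest => exact ⟨a, rest, rfl⟩
      have hget0 : PySem.Str.pyGet? k 0 = some a := by
        have h0 := PySem.Str.pyGet?_natCast k 0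
        simp only [Nat.cast_zero] at h0
        rw [h0, hk]; rfl
      have hhead : low[j]? = some a := by
        rw [← List.head?_drop]
        rcases hj with ⟨suf, hsuf⟩
        rw [← hsuf, hk]; rfl
      have hval : low[j] = a := by
        have := List.getElem?_eq_getElem (l := low) hjlt
        rw [hhead] at this
        exact (Option.some.injEq _ _).mp this.symm
      rw [hget0]
      simp [hval]
    · simpa using hj
  · rintro ⟨ic, _, k, ⟨hkmem, _⟩, hpre⟩
    exact ⟨k, hkmem,
      (PySem.Chars.exists_prefix_drop_iff_isIn k.toList low).1 ⟨ic.1.toNat, hpre⟩⟩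

-- ===== VERDICT (by name: the statement is the Claim_ definition above) =====
theorem filter_relevant_sentences_spec : Claim_equal_filter_relevant_sentences := by
  intro sentences _
  unfold Spec_filter_relevant_sentences filter_relevant_sentences filter_relevant_sentences_alt
  rw [PySem.List.foldl_append_if
      (fun sentence => pvKeywordsA.any (fun keyword => PySem.Str.isIn keyword (PySem.Str.lower sentence)))
      (fun x => x) sentences []]
  simp only [List.map_id', List.nil_append]
  exact List.filter_congr (fun x _ => pv_per_sentence x)
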